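-- pv_equiv track=rewrite | github.com/epochlab/CHIMERA | chimera/measure.py | charged_residues
-- ===== SOURCE A (Python) =====
-- def charged_residues(peptide):
--     pos, neg = 0, 0
--     for i in peptide:
--         if i == "R" or i == "K" or i == "H":
--             pos += 1
--         if i == "D" or i == "E" or i == "C" or i == "Y":
--             neg += 1
--     return pos, neg
-- ===== SOURCE B (Python) =====
-- def charged_residues(peptide):
--     counts = {}
--     for ch in peptide:
--         counts[ch] = counts.get(ch, 0) + 1
--     pos = counts.get("R", 0) + counts.get("K", 0) + counts.get("H", 0)
--     neg = counts.get("D", 0) + counts.get("E", 0) + counts.get("C", 0) + counts.get("Y", 0)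
--     return pos, neg
-- ===== Notes on version B (the rewrite author's own statement) =====
-- stated objective: alternative
-- what changed: Replaces A's per-character accumulation with two branch tests by building a frequency table of the peptide once and then summing seven dictionary lookups.
import Mathlib
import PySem

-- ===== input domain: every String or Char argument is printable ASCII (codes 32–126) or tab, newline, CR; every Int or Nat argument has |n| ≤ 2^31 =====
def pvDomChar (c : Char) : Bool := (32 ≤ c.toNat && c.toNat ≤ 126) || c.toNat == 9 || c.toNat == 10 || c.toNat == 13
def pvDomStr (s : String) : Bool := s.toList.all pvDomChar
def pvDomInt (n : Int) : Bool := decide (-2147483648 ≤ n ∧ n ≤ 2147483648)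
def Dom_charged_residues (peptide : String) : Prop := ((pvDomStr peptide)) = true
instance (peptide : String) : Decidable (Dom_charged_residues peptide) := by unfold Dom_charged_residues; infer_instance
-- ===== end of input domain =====

-- B replaces A's accumulating pass (two branch tests per character) by a frequency table built once, then seven lookups (objective: alternative).

-- ===== PORT A =====
-- for i in peptide: two independent ifs over the pair state (pos, neg)
def charged_residues (peptide : String) : Int × Int :=
  peptide.toList.foldl
    (fun (st : Int × Int) i =>
      let pos := if i == 'R' || i == 'K' || i == 'H' then st.1 + 1 else st.1
      let neg := if i == 'D' || i == 'E' || i == 'C' || i == 'Y' then st.2 + 1 else st.2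
      (pos, neg))
    (0, 0)

-- ===== PORT B =====
-- counts[ch] = counts.get(ch, 0) + 1 over the peptide, then lookups with default 0
def charged_residues_alt (peptide : String) : Int × Int :=
  let counts : PySem.Dict Char Int :=
    peptide.toList.foldl (fun d ch => d.insert ch (d.getD ch 0 + 1)) PySem.Dict.empty
  let pos := counts.getD 'R' 0 + counts.getD 'K' 0 + counts.getD 'H' 0
  let neg := counts.getD 'D' 0 + counts.getD 'E' 0 + counts.getD 'C' 0 + counts.getD 'Y' 0
  (pos, neg)

-- ===== PRECONDITION & SPEC =====
def Spec_charged_residues (peptide : String) (out : Int × Int) : Prop := out = charged_residues_alt peptide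
instance (peptide : String) (out : Int × Int) : Decidable (Spec_charged_residues peptide out) := by unfold Spec_charged_residues; infer_instance

-- ===== CLAIM (what is proved, stated in full; the proofs are below) =====
def Claim_equal_charged_residues : Prop := ∀ (peptide : String), Dom_charged_residues peptide → Spec_charged_residues peptide (charged_residues peptide)

-- ===== LEMMAS AND PROOFS =====

-- A's fold, from any start state, adds the per-class character counts.
theorem chargedA_foldl (l : List Char) (p n : Int) :
    l.foldl
      (fun (st : Int × Int) i =>
        let pos := if i == 'R' || i == 'K' || i == 'H' then st.1 + 1 else st.1
        let neg := if i == 'D' || i == 'E' || i == 'C' || i == 'Y' then st.2 + 1 else st.2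
        (pos, neg))
      (p, n)
    = (p + (l.count 'R' : Int) + l.count 'K' + l.count 'H',
       n + (l.count 'D' : Int) + l.count 'E' + l.count 'C' + l.count 'Y') := by
  induction l generalizing p n with
  | nil => simp
  | cons c t ih =>
    simp only [List.foldl_cons, ih, List.count_cons]
    simp only [beq_iff_eq, Bool.or_eq_true, Prod.mk.injEq]
    refine ⟨?_, ?_⟩ <;> split_ifs <;> simp_all <;> ring

theorem charged_residues_spec : Claim_equal_charged_residues := by
  intro peptide _
  show charged_residues peptide = charged_residues_alt peptide
  unfold charged_residues charged_residues_alt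
  simp only [PySem.Dict.getD_foldl_insert_add_one, chargedA_foldl, PySem.Dict.getD_empty]
  simp only [Prod.mk.injEq]
  constructor <;> ring
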